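-- pv_equiv track=rewrite | github.com/jmazala/algoexpert | square-of-zeroes/main.py | squareOfZeroes
-- ===== SOURCE A (Python) =====
-- from typing import Dict, List
--
-- def squareOfZeroes(matrix: List[int]) -> bool:
--     n = len(matrix)
--
--     if n < 2:
--         return False
--
--     zeroMap = createZeroMap(matrix)
--
--     for i in range(len(matrix)):
--         for j in range(len(matrix)):
--             if matrix[i][j] == 1:
--                 continue
--
--             length = 2
--             while i + length <= n and j + length <= n:
--                 if isSquare(i, j, length, matrix, zeroMap):
--                     return True
--
--                 length += 1
--
--     return False
--
-- def isSquare(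
--     i: int, j: int, length: int, matrix: List[int], zeroMap: List[List[Dict[str, int]]]
-- ) -> bool:
--     top = i
--     bottom = i + length - 1
--     left = j
--     right = j + length - 1
--
--     return (
--         zeroMap[top][left]["right"] >= length  # top row
--         and zeroMap[bottom][left]["right"] >= length  # bottom row
--         and zeroMap[top][left]["below"] >= length  # left col
--         and zeroMap[top][right]["below"] >= length  # right col
--     )
--
-- def createZeroMap(matrix) -> List[List[Dict[str, int]]]:
--     zeroMap = []
--
--     for i in reversed(range(len(matrix))):
--         row = []
--
--         for j in reversed(range(len(matrix))):
--             item = {"below": 0, "right": 0}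
--             row.insert(0, item)
--
--             if matrix[i][j] == 1:
--                 continue
--
--             item["below"] += 1
--             item["right"] += 1
--
--             if i < len(matrix) - 1:
--                 item["below"] += zeroMap[0][j]["below"]
--
--             if j < len(matrix) - 1:
--                 item["right"] += row[1]["right"]
--
--         zeroMap.insert(0, row)
--
--     return zeroMap
-- ===== SOURCE B (Python) =====
-- def squareOfZeroes(matrix):
--     n = len(matrix)
--     if n < 2:
--         return False
--     for size in range(2, n + 1):
--         for top in range(n - size + 1):
--             for left in range(n - size + 1):
--                 bottom = top + size - 1
--                 right = left + size - 1
--                 if (all(matrix[top][c] != 1 for c in range(left, right + 1))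
--                         and all(matrix[bottom][c] != 1 for c in range(left, right + 1))
--                         and all(matrix[r][left] != 1 for r in range(top, bottom + 1))
--                         and all(matrix[r][right] != 1 for r in range(top, bottom + 1))):
--                     return True
--     return False
-- ===== Notes on version B (the rewrite author's own statement) =====
-- stated objective: simpler
-- what changed: B drops A's run-length zeroMap precomputation (built backwards with mutated dict items) and instead enumerates square sizes and top-left corners, checking each square's border directly with four range scans; B avoids the always-paid O(n^2) dict-heavy table build, though its worst-case scan count is higher.
import Mathlib
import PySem

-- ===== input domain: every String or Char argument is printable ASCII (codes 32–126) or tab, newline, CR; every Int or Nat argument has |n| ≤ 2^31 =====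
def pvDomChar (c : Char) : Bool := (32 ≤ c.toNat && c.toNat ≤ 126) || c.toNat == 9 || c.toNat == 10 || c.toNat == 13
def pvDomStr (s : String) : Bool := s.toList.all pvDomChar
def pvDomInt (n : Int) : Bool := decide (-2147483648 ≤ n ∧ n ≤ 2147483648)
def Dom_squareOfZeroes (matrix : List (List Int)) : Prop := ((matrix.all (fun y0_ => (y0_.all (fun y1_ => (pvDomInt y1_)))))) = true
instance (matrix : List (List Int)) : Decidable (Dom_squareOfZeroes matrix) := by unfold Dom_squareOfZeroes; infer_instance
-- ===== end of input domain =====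

-- B drops A's run-length zeroMap precomputation and instead enumerates square sizes and
-- checks each square's border directly with four range scans (objective: simpler).

-- matrix[i][j]; inside Pre_ every access is in range, so the default 0 is never returned
def get2 (mat : List (List Int)) (i j : ℕ) : Int := (mat.getD i []).getD j 0

-- ===== PORT A =====
-- inner loop of createZeroMap: items for columns j..n-1 of row i (built back to front,
-- `row.insert(0, item)` + in-place mutation of `item` = compute the item, then cons)
def rowFromA (mat : List (List Int)) (n i : ℕ) (below : List (Int × Int)) (j : ℕ) :
    List (Int × Int) :=
  if h : j < n then
    let rest := rowFromA mat n i below (j + 1)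
    let item : Int × Int :=
      if get2 mat i j = 1 then (0, 0)
      else (1 + (if i < n - 1 then (below.getD j (0, 0)).1 else 0),
            1 + (if j < n - 1 then (rest.headD (0, 0)).2 else 0))
    item :: rest
  else []
termination_by n - j

-- outer loop of createZeroMap: rows i..n-1 (`zeroMap.insert(0, row)` = cons; the row uses
-- `zeroMap[0]` = the previously built row i+1)
def mapFromA (mat : List (List Int)) (n i : ℕ) : List (List (Int × Int)) :=
  if h : i < n then
    rowFromA mat n i ((mapFromA mat n (i + 1)).headD []) 0 :: mapFromA mat n (i + 1)
  else []
termination_by n - i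

-- item = (below, right)
def isSquareA (i j L : ℕ) (zm : List (List (Int × Int))) : Bool :=
  decide ((L : Int) ≤ ((zm.getD i []).getD j (0, 0)).2) &&
  decide ((L : Int) ≤ ((zm.getD (i + L - 1) []).getD j (0, 0)).2) &&
  decide ((L : Int) ≤ ((zm.getD i []).getD j (0, 0)).1) &&
  decide ((L : Int) ≤ ((zm.getD i []).getD (j + L - 1) (0, 0)).1)

-- the `while i + length <= n and j + length <= n` loop
def lenLoopA (mat : List (List Int)) (n : ℕ) (zm : List (List (Int × Int))) (i j L : ℕ) :
    Bool :=
  if h : i + L ≤ n ∧ j + L ≤ n then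
    isSquareA i j L zm || lenLoopA mat n zm i j (L + 1)
  else false
termination_by n + 1 - L
decreasing_by omega

def squareOfZeroes (matrix : List (List Int)) : Bool :=
  let n := matrix.length
  if n < 2 then false
  else
    let zm := mapFromA matrix n 0
    (List.range n).any fun i =>
      (List.range n).any fun j =>
        if get2 matrix i j = 1 then false else lenLoopA matrix n zm i j 2

-- ===== PORT B =====
def borderClearB (mat : List (List Int)) (top left size : ℕ) : Bool :=
  let bottom := top + size - 1
  let right := left + size - 1
  ((List.range' left (right + 1 - left)).all fun c => get2 mat top c != 1) &&
  ((List.range' left (right + 1 - left)).all fun c => get2 mat bottom c != 1) &&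
  ((List.range' top (bottom + 1 - top)).all fun r => get2 mat r left != 1) &&
  ((List.range' top (bottom + 1 - top)).all fun r => get2 mat r right != 1)

def squareOfZeroes_alt (matrix : List (List Int)) : Bool :=
  let n := matrix.length
  if n < 2 then false
  else
    (List.range' 2 (n + 1 - 2)).any fun size =>
      (List.range (n - size + 1)).any fun top =>
        (List.range (n - size + 1)).any fun left =>
          borderClearB matrix top left size

-- ===== PRECONDITION & SPEC =====
-- Pre_ excludes exactly the inputs on which Python A raises IndexError: a matrix with at
-- least 2 rows some row of which is shorter than the number of rows.
def Pre_squareOfZeroes (matrix : List (List Int)) : Prop :=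
  matrix.length < 2 ∨ ∀ row ∈ matrix, matrix.length ≤ row.length
instance (matrix : List (List Int)) : Decidable (Pre_squareOfZeroes matrix) := by
  unfold Pre_squareOfZeroes; infer_instance
def pvWitness_squareOfZeroes : List (List Int) := [[0, 0], [0, 0]]

def Spec_squareOfZeroes (matrix : List (List Int)) (out : Bool) : Prop := out = squareOfZeroes_alt matrix
instance (matrix : List (List Int)) (out : Bool) : Decidable (Spec_squareOfZeroes matrix out) := by unfold Spec_squareOfZeroes; infer_instance

-- ===== CLAIM (what is proved, stated in full; the proofs are below) =====
def Claim_equal_squareOfZeroes : Prop := ∀ (matrix : List (List Int)), Dom_squareOfZeroes matrix → Pre_squareOfZeroes matrix → Spec_squareOfZeroes matrix (squareOfZeroes matrix)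

-- ===== LEMMAS AND PROOFS =====

-- reference run lengths: rightVal/belowVal = the "right"/"below" fields of A's zeroMap
def rightVal (mat : List (List Int)) (n i j : ℕ) : Int :=
  if get2 mat i j = 1 then 0
  else 1 + (if h : j < n - 1 then rightVal mat n i (j + 1) else 0)
termination_by n - j
decreasing_by omega

def belowVal (mat : List (List Int)) (n i j : ℕ) : Int :=
  if get2 mat i j = 1 then 0
  else 1 + (if h : i < n - 1 then belowVal mat n (i + 1) j else 0)
termination_by n - i
decreasing_by omega

def itemA (mat : List (List Int)) (n i : ℕ) (below : List (Int × Int)) (j : ℕ) : Int × Int :=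
  if get2 mat i j = 1 then (0, 0)
  else (1 + (if i < n - 1 then (below.getD j (0, 0)).1 else 0),
        1 + (if j < n - 1 then ((rowFromA mat n i below (j + 1)).headD (0, 0)).2 else 0))

-- the all-zero-border predicate both programs decide
def BorderP (mat : List (List Int)) (i j L : ℕ) : Prop :=
  (∀ k < L, get2 mat i (j + k) ≠ 1) ∧ (∀ k < L, get2 mat (i + L - 1) (j + k) ≠ 1) ∧
  (∀ k < L, get2 mat (i + k) j ≠ 1) ∧ (∀ k < L, get2 mat (i + k) (j + L - 1) ≠ 1)

theorem rightVal_nonneg : ∀ (fuel : ℕ) (mat : List (List Int)) (n i j : ℕ),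
    n - j ≤ fuel → 0 ≤ rightVal mat n i j := by
  intro fuel
  induction fuel with
  | zero =>
    intro mat n i j h
    rw [rightVal]
    split_ifs with h1 h2 <;> [skip; omega; skip] <;> omega
  | succ f ih =>
    intro mat n i j h
    rw [rightVal]
    split_ifs with h1 h2
    · omega
    · have := ih mat n i (j + 1) (by omega)
      omega
    · omega

theorem belowVal_nonneg : ∀ (fuel : ℕ) (mat : List (List Int)) (n i j : ℕ),
    n - i ≤ fuel → 0 ≤ belowVal mat n i j := by
  intro fuel
  induction fuel with
  | zero =>
    intro mat n i j h
    rw [belowVal]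
    split_ifs with h1 h2 <;> [skip; omega; skip] <;> omega
  | succ f ih =>
    intro mat n i j h
    rw [belowVal]
    split_ifs with h1 h2
    · omega
    · have := ih mat n (i + 1) j (by omega)
      omega
    · omega

theorem rightVal_ge_iff : ∀ (L : ℕ) (mat : List (List Int)) (n i j : ℕ), j + L ≤ n →
    ((L : Int) ≤ rightVal mat n i j ↔ ∀ k < L, get2 mat i (j + k) ≠ 1) := by
  intro L
  induction L with
  | zero =>
    intro mat n i j _
    have := rightVal_nonneg n mat n i j (by omega)
    simp [this]
  | succ L ih =>
    intro mat n i j h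
    rw [rightVal]
    split_ifs with h1 h2
    · constructor
      · intro hc; omega
      · intro hc; exact absurd h1 (by simpa using hc 0 (by omega))
    · have hih := ih mat n i (j + 1) (by omega)
      have hnn := rightVal_nonneg n mat n i (j + 1) (by omega)
      constructor
      · intro hc k hk
        rcases Nat.eq_zero_or_pos k with rfl | hkp
        · simpa using h1
        · have : ((L : Int)) ≤ rightVal mat n i (j + 1) := by omega
          have := (hih.mp this) (k - 1) (by omega)
          have he : j + 1 + (k - 1) = j + k := by omega
          rwa [he] at this
      · intro hc
        have : ∀ k < L, get2 mat i (j + 1 + k) ≠ 1 := by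
          intro k hk
          have := hc (k + 1) (by omega)
          have he : j + (k + 1) = j + 1 + k := by omega
          rwa [he] at this
        have := hih.mpr this
        omega
    · -- j ≥ n - 1, so with j + L + 1 ≤ n we get L = 0
      have hL0 : L = 0 := by omega
      subst hL0
      constructor
      · intro _ k hk
        interval_cases k
        simpa using h1
      · intro _; omega

theorem belowVal_ge_iff : ∀ (L : ℕ) (mat : List (List Int)) (n i j : ℕ), i + L ≤ n →
    ((L : Int) ≤ belowVal mat n i j ↔ ∀ k < L, get2 mat (i + k) j ≠ 1) := by
  intro L
  induction L with
  | zero =>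
    intro mat n i j _
    have := belowVal_nonneg n mat n i j (by omega)
    simp [this]
  | succ L ih =>
    intro mat n i j h
    rw [belowVal]
    split_ifs with h1 h2
    · constructor
      · intro hc; omega
      · intro hc; exact absurd h1 (by simpa using hc 0 (by omega))
    · have hih := ih mat n (i + 1) j (by omega)
      have hnn := belowVal_nonneg n mat n (i + 1) j (by omega)
      constructor
      · intro hc k hk
        rcases Nat.eq_zero_or_pos k with rfl | hkp
        · simpa using h1
        · have : ((L : Int)) ≤ belowVal mat n (i + 1) j := by omega
          have := (hih.mp this) (k - 1) (by omega)
          have he : i + 1 + (k - 1) = i + k := by omega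
          rwa [he] at this
      · intro hc
        have : ∀ k < L, get2 mat (i + 1 + k) j ≠ 1 := by
          intro k hk
          have := hc (k + 1) (by omega)
          have he : i + (k + 1) = i + 1 + k := by omega
          rwa [he] at this
        have := hih.mpr this
        omega
    · have hL0 : L = 0 := by omega
      subst hL0
      constructor
      · intro _ k hk
        interval_cases k
        simpa using h1
      · intro _; omega

theorem rowFromA_eq (mat : List (List Int)) (n i : ℕ) (below : List (Int × Int)) (j : ℕ)
    (h : j < n) :
    rowFromA mat n i below j = itemA mat n i below j :: rowFromA mat n i below (j + 1) := by
  rw [rowFromA]; simp [h, itemA]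

theorem mapFromA_eq (mat : List (List Int)) (n i : ℕ) (h : i < n) :
    mapFromA mat n i
      = rowFromA mat n i ((mapFromA mat n (i + 1)).headD []) 0 :: mapFromA mat n (i + 1) := by
  rw [mapFromA]; simp [h]

theorem rowFromA_getD : ∀ (d : ℕ) (mat : List (List Int)) (n i : ℕ)
    (below : List (Int × Int)) (j' : ℕ), j' + d < n →
    (rowFromA mat n i below j').getD d (0, 0) = itemA mat n i below (j' + d) := by
  intro d
  induction d with
  | zero =>
    intro mat n i below j' h
    rw [rowFromA_eq mat n i below j' (by omega)]
    simp
  | succ d ih =>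
    intro mat n i below j' h
    rw [rowFromA_eq mat n i below j' (by omega)]
    have := ih mat n i below (j' + 1) (by omega)
    simpa [Nat.add_assoc, Nat.add_comm 1 d] using this

theorem mapFromA_getD : ∀ (d : ℕ) (mat : List (List Int)) (n i' : ℕ), i' + d < n →
    (mapFromA mat n i').getD d []
      = rowFromA mat n (i' + d) ((mapFromA mat n (i' + d + 1)).headD []) 0 := by
  intro d
  induction d with
  | zero =>
    intro mat n i' h
    rw [mapFromA_eq mat n i' (by omega)]
    simp
  | succ d ih =>
    intro mat n i' h
    rw [mapFromA_eq mat n i' (by omega)]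
    have := ih mat n (i' + 1) (by omega)
    simpa [Nat.add_assoc, Nat.add_comm 1 d] using this

def entryA (mat : List (List Int)) (n i j : ℕ) : Int × Int :=
  (((mapFromA mat n 0).getD i []).getD j (0, 0))

theorem entryA_eq (mat : List (List Int)) (n i j : ℕ) (hi : i < n) (hj : j < n) :
    entryA mat n i j = itemA mat n i ((mapFromA mat n (i + 1)).headD []) j := by
  unfold entryA
  rw [mapFromA_getD i mat n 0 (by omega)]
  rw [rowFromA_getD j mat n (0 + i) _ 0 (by omega)]
  simp

theorem itemA_snd : ∀ (fuel : ℕ) (mat : List (List Int)) (n i : ℕ)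
    (below : List (Int × Int)) (j : ℕ), n - j ≤ fuel → j < n →
    (itemA mat n i below j).2 = rightVal mat n i j := by
  intro fuel
  induction fuel with
  | zero => intro mat n i below j h hj; omega
  | succ f ih =>
    intro mat n i below j h hj
    unfold itemA
    rw [rightVal]
    by_cases h1 : get2 mat i j = 1
    · simp [h1]
    · rw [if_neg h1, if_neg h1]
      by_cases h2 : j < n - 1
      · rw [dif_pos h2, if_pos h2]
        rw [rowFromA_eq mat n i below (j + 1) (by omega), List.headD_cons,
            ih mat n i below (j + 1) (by omega) (by omega)]
      · rw [dif_neg h2, if_neg h2]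

theorem entryA_snd (mat : List (List Int)) (n i j : ℕ) (hi : i < n) (hj : j < n) :
    (entryA mat n i j).2 = rightVal mat n i j := by
  rw [entryA_eq mat n i j hi hj]
  exact itemA_snd n mat n i _ j (by omega) hj

theorem entryA_fst : ∀ (fuel : ℕ) (mat : List (List Int)) (n i j : ℕ), n - i ≤ fuel →
    i < n → j < n → (entryA mat n i j).1 = belowVal mat n i j := by
  intro fuel
  induction fuel with
  | zero => intro mat n i j h hi hj; omega
  | succ f ih =>
    intro mat n i j h hi hj
    rw [entryA_eq mat n i j hi hj]
    unfold itemA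
    rw [belowVal]
    by_cases h1 : get2 mat i j = 1
    · simp [h1]
    · rw [if_neg h1, if_neg h1]
      by_cases h2 : i < n - 1
      · rw [dif_pos h2, if_pos h2]
        rw [mapFromA_eq mat n (i + 1) (by omega)]
        simp only [List.headD_cons]
        rw [show rowFromA mat n (i + 1) ((mapFromA mat n (i + 1 + 1)).headD []) 0
              = (mapFromA mat n 0).getD (i + 1) [] from by
            have := mapFromA_getD (i + 1) mat n 0 (by omega)
            simpa using this.symm]
        have := ih mat n (i + 1) j (by omega) (by omega) hj
        unfold entryA at this
        rw [this]
      · rw [dif_neg h2, if_neg h2]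

theorem isSquareA_iff (mat : List (List Int)) (n i j L : ℕ) (hL : 2 ≤ L)
    (hi : i + L ≤ n) (hj : j + L ≤ n) :
    isSquareA i j L (mapFromA mat n 0) = true ↔ BorderP mat i j L := by
  have e1 := entryA_snd mat n i j (by omega) (by omega)
  have e2 := entryA_snd mat n (i + L - 1) j (by omega) (by omega)
  have e3 := entryA_fst n mat n i j (by omega) (by omega) (by omega)
  have e4 := entryA_fst n mat n i (j + L - 1) (by omega) (by omega) (by omega)
  unfold entryA at e1 e2 e3 e4
  unfold isSquareA BorderP
  simp only [Bool.and_eq_true, decide_eq_true_eq]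
  rw [e1, e2, e3, e4,
      rightVal_ge_iff L mat n i j hj, rightVal_ge_iff L mat n (i + L - 1) j hj,
      belowVal_ge_iff L mat n i j hi, belowVal_ge_iff L mat n i (j + L - 1) hi]
  tauto

theorem lenLoopA_iff : ∀ (fuel : ℕ) (mat : List (List Int)) (n : ℕ)
    (zm : List (List (Int × Int))) (i j L : ℕ), n + 1 - L ≤ fuel →
    (lenLoopA mat n zm i j L = true ↔
      ∃ L', L ≤ L' ∧ i + L' ≤ n ∧ j + L' ≤ n ∧ isSquareA i j L' zm = true) := by
  intro fuel
  induction fuel with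
  | zero =>
    intro mat n zm i j L h
    rw [lenLoopA, dif_neg (by omega)]
    constructor
    · intro hc; simp at hc
    · rintro ⟨L', h1, h2, h3, h4⟩; omega
  | succ f ih =>
    intro mat n zm i j L h
    rw [lenLoopA]
    by_cases hc : i + L ≤ n ∧ j + L ≤ n
    · rw [dif_pos hc]
      simp only [Bool.or_eq_true]
      rw [ih mat n zm i j (L + 1) (by omega)]
      constructor
      · rintro (hs | ⟨L', h1, h2, h3, h4⟩)
        · exact ⟨L, le_refl L, hc.1, hc.2, hs⟩
        · exact ⟨L', by omega, h2, h3, h4⟩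
      · rintro ⟨L', h1, h2, h3, h4⟩
        rcases Nat.eq_or_lt_of_le h1 with rfl | hlt
        · exact Or.inl h4
        · exact Or.inr ⟨L', by omega, h2, h3, h4⟩
    · rw [dif_neg hc]
      constructor
      · intro hx; simp at hx
      · rintro ⟨L', h1, h2, h3, h4⟩; exact absurd (by omega : i + L ≤ n ∧ j + L ≤ n) hc

theorem A_iff (mat : List (List Int)) :
    squareOfZeroes mat = true ↔
      ∃ i j L, 2 ≤ L ∧ i + L ≤ mat.length ∧ j + L ≤ mat.length ∧ BorderP mat i j L := by
  by_cases hn : mat.length < 2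
  · unfold squareOfZeroes
    rw [if_pos hn]
    constructor
    · intro hx; simp at hx
    · rintro ⟨i, j, L, h1, h2, h3, h4⟩; exfalso; omega
  · unfold squareOfZeroes
    rw [if_neg hn]
    simp only [List.any_eq_true, List.mem_range]
    constructor
    · rintro ⟨i, hi, j, hj, hx⟩
      by_cases hg : get2 mat i j = 1
      · rw [if_pos hg] at hx; simp at hx
      · rw [if_neg hg] at hx
        obtain ⟨L', h1, h2, h3, h4⟩ :=
          (lenLoopA_iff (mat.length + 1) mat mat.length _ i j 2 (by omega)).mp hx
        exact ⟨i, j, L', h1, h2, h3,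
          (isSquareA_iff mat mat.length i j L' h1 h2 h3).mp h4⟩
    · rintro ⟨i, j, L, hL, hi, hj, hb⟩
      refine ⟨i, by omega, j, by omega, ?_⟩
      have hg : get2 mat i j ≠ 1 := by
        have := hb.1 0 (by omega); simpa using this
      rw [if_neg hg]
      exact (lenLoopA_iff (mat.length + 1) mat mat.length _ i j 2 (by omega)).mpr
        ⟨L, hL, hi, hj, (isSquareA_iff mat mat.length i j L hL hi hj).mpr hb⟩

theorem all_range'_iff (f : ℕ → Bool) (a cnt : ℕ) :
    (List.range' a cnt).all f = true ↔ ∀ k < cnt, f (a + k) = true := by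
  simp only [List.all_eq_true, List.mem_range'_1]
  constructor
  · intro h k hk; exact h (a + k) ⟨by omega, by omega⟩
  · rintro h c ⟨h1, h2⟩
    have := h (c - a) (by omega)
    rwa [Nat.add_sub_cancel' h1] at this

theorem borderClearB_iff (mat : List (List Int)) (top left size : ℕ) (h : 2 ≤ size) :
    borderClearB mat top left size = true ↔ BorderP mat top left size := by
  unfold borderClearB BorderP
  simp only [Bool.and_eq_true]
  rw [show left + size - 1 + 1 - left = size from by omega,
      show top + size - 1 + 1 - top = size from by omega]
  simp only [all_range'_iff, bne_iff_ne, ne_eq]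
  tauto

theorem B_iff (mat : List (List Int)) :
    squareOfZeroes_alt mat = true ↔
      ∃ i j L, 2 ≤ L ∧ i + L ≤ mat.length ∧ j + L ≤ mat.length ∧ BorderP mat i j L := by
  by_cases hn : mat.length < 2
  · unfold squareOfZeroes_alt
    rw [if_pos hn]
    constructor
    · intro hx; simp at hx
    · rintro ⟨i, j, L, h1, h2, h3, h4⟩; exfalso; omega
  · unfold squareOfZeroes_alt
    rw [if_neg hn]
    simp only [List.any_eq_true, List.mem_range'_1, List.mem_range]
    constructor
    · rintro ⟨size, hs, top, ht, left, hl, hb⟩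
      exact ⟨top, left, size, hs.1, by omega, by omega,
        (borderClearB_iff mat top left size hs.1).mp hb⟩
    · rintro ⟨i, j, L, hL, hi, hj, hb⟩
      exact ⟨L, ⟨hL, by omega⟩, i, by omega, j, by omega,
        (borderClearB_iff mat i j L hL).mpr hb⟩

-- ===== VERDICT (by name: the statement is the Claim_ definition above) =====
theorem squareOfZeroes_spec : Claim_equal_squareOfZeroes := by
  intro matrix _ _
  unfold Spec_squareOfZeroes
  cases hA : squareOfZeroes matrix <;> cases hB : squareOfZeroes_alt matrix
  · rfl
  · exact absurd ((A_iff matrix).mpr ((B_iff matrix).mp hB)) (by simp [hA])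
  · exact absurd ((B_iff matrix).mpr ((A_iff matrix).mp hA)) (by simp [hB])
  · rfl
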